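-- pv_equiv track=rewrite | github.com/Matheuscos350/Jogo-da-Velha-Monte-Carlo | montecarlo_tic.py | count_consecutive_wins
-- ===== SOURCE A (Python) =====
-- def count_consecutive_wins(results):
--     x_streak = 0
--     o_streak = 0
--     x_streaks = []
--     o_streaks = []
--
--     for result in results:
--         if result == 'X':
--             x_streak += 1
--             o_streak = 0
--         elif result == 'O':
--             o_streak += 1
--             x_streak = 0
--         else:  # Empate
--             x_streak = 0
--             o_streak = 0
--         x_streaks.append(x_streak)
--         o_streaks.append(o_streak)
--
--     return x_streaks, o_streaks
-- ===== SOURCE B (Python) =====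
-- def count_consecutive_wins(results):
--     # Run-length decomposition: split results into maximal runs of equal
--     # values, then emit a ramp 1..k for the winner's run and zeros elsewhere.
--     x_streaks = []
--     o_streaks = []
--     i = 0
--     n = len(results)
--     while i < n:
--         j = i
--         while j < n and results[j] == results[i]:
--             j += 1
--         k = j - i
--         if results[i] == 'X':
--             x_streaks += list(range(1, k + 1))
--             o_streaks += [0] * k
--         elif results[i] == 'O':
--             o_streaks += list(range(1, k + 1))
--             x_streaks += [0] * k
--         else:
--             x_streaks += [0] * k
--             o_streaks += [0] * k
--         i = j
--     return x_streaks, o_streaks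
-- ===== Notes on version B (the rewrite author's own statement) =====
-- stated objective: alternative
-- what changed: Replaces A's single element-wise loop carrying two coupled reset counters with a run-length decomposition: split the input into maximal runs of equal values and emit a ramp 1..k for the winner's run block and zero blocks elsewhere.
import Mathlib
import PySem

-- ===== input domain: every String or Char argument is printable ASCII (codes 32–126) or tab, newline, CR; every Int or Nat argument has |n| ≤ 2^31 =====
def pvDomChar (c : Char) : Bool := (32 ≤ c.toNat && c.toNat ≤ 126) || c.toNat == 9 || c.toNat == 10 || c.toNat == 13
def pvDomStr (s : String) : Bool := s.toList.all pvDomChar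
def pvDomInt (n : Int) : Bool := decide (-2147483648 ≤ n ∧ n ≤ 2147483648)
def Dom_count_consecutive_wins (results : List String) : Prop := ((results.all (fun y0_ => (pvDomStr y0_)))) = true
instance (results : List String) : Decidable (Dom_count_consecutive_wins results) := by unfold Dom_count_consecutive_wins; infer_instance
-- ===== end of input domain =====

-- B replaces A's coupled two-counter loop by a run-length decomposition over maximal runs of equal results (alternative algorithm, same cost).

-- ===== PORT A =====
-- one coupled loop carrying both streak counters and both output lists
def countA (x_streak o_streak : Int) : List String → List Int × List Int
  | [] => ([], [])
  | r :: rs =>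
    let (x', o') :=
      if r == "X" then (x_streak + 1, (0 : Int))
      else if r == "O" then ((0 : Int), o_streak + 1)
      else ((0 : Int), (0 : Int))
    let (xs, os) := countA x' o' rs
    (x' :: xs, o' :: os)

def count_consecutive_wins (results : List String) : List Int × List Int :=
  countA 0 0 results

-- ===== PORT B =====
-- outer while loop over the start of each maximal run; the inner 'while results[j]==results[i]'
-- scan is the takeWhile/dropWhile split of the tail
def countB : List String → List Int × List Int
  | [] => ([], [])
  | r :: rs =>
    let run := rs.takeWhile (fun s => s == r)
    let rest := rs.dropWhile (fun s => s == r)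
    let k : Int := (run.length : Int) + 1
    let (xs, os) := countB rest
    if r == "X" then (PySem.List.pyRange 1 (k + 1) 1 ++ xs, List.replicate (run.length + 1) 0 ++ os)
    else if r == "O" then (List.replicate (run.length + 1) 0 ++ xs, PySem.List.pyRange 1 (k + 1) 1 ++ os)
    else (List.replicate (run.length + 1) 0 ++ xs, List.replicate (run.length + 1) 0 ++ os)
  termination_by l => l.length
  decreasing_by
    simp only [List.length_cons]
    exact Nat.lt_succ_of_le (List.length_dropWhile_le _ _)

def count_consecutive_wins_alt (results : List String) : List Int × List Int :=
  countB results

-- ===== PRECONDITION & SPEC =====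
def Spec_count_consecutive_wins (results : List String) (out : List Int × List Int) : Prop := out = count_consecutive_wins_alt results
instance (results : List String) (out : List Int × List Int) : Decidable (Spec_count_consecutive_wins results out) := by unfold Spec_count_consecutive_wins; infer_instance

-- ===== CLAIM (what is proved, stated in full; the proofs are below) =====
def Claim_equal_count_consecutive_wins : Prop := ∀ (results : List String), Dom_count_consecutive_wins results → Spec_count_consecutive_wins results (count_consecutive_wins results)

-- ===== LEMMAS AND PROOFS =====

-- the x-counter is irrelevant when the list does not start with "X"
theorem countA_irrel_x (rs : List String) (h : rs.head? ≠ some "X") (x x' o : Int) :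
    countA x o rs = countA x' o rs := by
  cases rs with
  | nil => rfl
  | cons r tl =>
    have hr : r ≠ "X" := by intro he; exact h (by simp [he])
    simp [countA, hr]

-- the o-counter is irrelevant when the list does not start with "O"
theorem countA_irrel_o (rs : List String) (h : rs.head? ≠ some "O") (x o o' : Int) :
    countA x o rs = countA x o' rs := by
  cases rs with
  | nil => rfl
  | cons r tl =>
    have hr : r ≠ "O" := by intro he; exact h (by simp [he])
    by_cases hx : r = "X" <;> simp [countA, hx, hr]

-- a maximal run of "X"s from state (x,0) emits a ramp and zeros
theorem countA_run_X (k : Nat) (rest : List String) (hrest : rest.head? ≠ some "X") :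
    ∀ x : Int,
    countA x 0 (List.replicate (k + 1) "X" ++ rest) =
      (PySem.List.pyRange (x + 1) (x + 1 + (k + 1)) 1 ++ (countA 0 0 rest).1,
       List.replicate (k + 1) (0 : Int) ++ (countA 0 0 rest).2) := by
  induction k with
  | zero =>
    intro x
    rw [PySem.List.pyRange_one_cons (by omega), PySem.List.pyRange_one_eq_nil (by omega)]
    simp [countA, countA_irrel_x rest hrest (x + 1) 0 0]
  | succ n ih =>
    intro x
    rw [PySem.List.pyRange_one_cons (by push_cast; omega)]
    have h1 := congrArg Prod.fst (ih (x + 1))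
    have h2 := congrArg Prod.snd (ih (x + 1))
    simp only [List.replicate_succ, List.cons_append, countA, BEq.rfl, if_pos] at h1 h2 ⊢
    rw [h1, h2]
    have heq : (x + 1 + ((((n : Int) + 1)) + 1)) = x + 1 + 1 + ((n : Int) + 1) := by ring
    push_cast
    rw [heq]

-- a maximal run of "O"s from state (0,o) emits zeros and a ramp
theorem countA_run_O (k : Nat) (rest : List String) (hrest : rest.head? ≠ some "O") :
    ∀ o : Int,
    countA 0 o (List.replicate (k + 1) "O" ++ rest) =
      (List.replicate (k + 1) (0 : Int) ++ (countA 0 0 rest).1,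
       PySem.List.pyRange (o + 1) (o + 1 + (k + 1)) 1 ++ (countA 0 0 rest).2) := by
  induction k with
  | zero =>
    intro o
    rw [PySem.List.pyRange_one_cons (by omega), PySem.List.pyRange_one_eq_nil (by omega)]
    simp [countA, countA_irrel_o rest hrest 0 (o + 1) 0]
  | succ n ih =>
    intro o
    rw [PySem.List.pyRange_one_cons (by push_cast; omega)]
    have h1 := congrArg Prod.fst (ih (o + 1))
    have h2 := congrArg Prod.snd (ih (o + 1))
    simp only [List.replicate_succ, List.cons_append, countA,
      (by decide : (("O" : String) == "X") = false), (by decide : (("O" : String) == "O") = true),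
      Bool.false_eq_true, if_false, if_true] at h1 h2 ⊢
    rw [h1, h2]
    have heq : (o + 1 + ((((n : Int) + 1)) + 1)) = o + 1 + 1 + ((n : Int) + 1) := by ring
    push_cast
    rw [heq]

-- a run of draws resets both counters and emits zeros on both sides
theorem countA_run_D (k : Nat) (r : String) (hx : r ≠ "X") (ho : r ≠ "O") (rest : List String) :
    ∀ x o : Int,
    countA x o (List.replicate (k + 1) r ++ rest) =
      (List.replicate (k + 1) (0 : Int) ++ (countA 0 0 rest).1,
       List.replicate (k + 1) (0 : Int) ++ (countA 0 0 rest).2) := by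
  induction k with
  | zero => intro x o; simp [countA, hx, ho]
  | succ n ih =>
    intro x o
    have h1 := congrArg Prod.fst (ih 0 0)
    have h2 := congrArg Prod.snd (ih 0 0)
    simp only [List.replicate_succ, List.cons_append, countA] at h1 h2 ⊢
    simp only [beq_iff_eq, hx, ho, if_false] at h1 h2 ⊢
    rw [h1, h2]

-- takeWhile (== r) is a replicate of r
theorem takeWhile_eq_replicate (r : String) (rs : List String) :
    rs.takeWhile (fun s => s == r) = List.replicate (rs.takeWhile (fun s => s == r)).length r := by
  apply List.eq_replicate_of_mem
  intro b hb
  have := List.mem_takeWhile_imp hb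
  simpa using this

-- the head of dropWhile (== r) is not r
theorem head?_dropWhile_ne (r : String) (rs : List String) :
    (rs.dropWhile (fun s => s == r)).head? ≠ some r := by
  induction rs with
  | nil => simp
  | cons a tl ih =>
    by_cases ha : a = r
    · simpa [ha] using ih
    · simp [ha]

-- ===== VERDICT (by name: the statement is the Claim_ definition above) =====
theorem count_consecutive_wins_spec : Claim_equal_count_consecutive_wins := by
  intro results _
  unfold Spec_count_consecutive_wins count_consecutive_wins count_consecutive_wins_alt
  suffices h : ∀ n (rs : List String), rs.length ≤ n → countB rs = countA 0 0 rs by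
    exact (h results.length results le_rfl).symm
  intro n
  induction n with
  | zero => intro rs h; rw [List.length_eq_zero_iff.mp (Nat.le_zero.mp h)]; simp [countB, countA]
  | succ n ih =>
    intro rs hlen
    cases rs with
    | nil => simp [countB, countA]
    | cons r tl =>
      have hsplit : r :: tl =
          List.replicate ((tl.takeWhile (fun s => s == r)).length + 1) r ++
            tl.dropWhile (fun s => s == r) := by
        rw [List.replicate_succ, List.cons_append, ← takeWhile_eq_replicate r tl,
          List.takeWhile_append_dropWhile]
      have hrest : (tl.dropWhile (fun s => s == r)).length ≤ n := by
        have := List.length_dropWhile_le (fun s => s == r) tl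
        simp at hlen; omega
      have hihr := ih _ hrest
      rw [countB]
      simp only []
      conv_rhs => rw [hsplit]
      by_cases hx : r = "X"
      · subst hx
        rw [countA_run_X _ _ (head?_dropWhile_ne _ tl) 0, ← hihr]
        cases hB : countB (tl.dropWhile (fun s => s == "X"))
        norm_num
        congr 1
        ring
      · by_cases ho : r = "O"
        · subst ho
          rw [countA_run_O _ _ (head?_dropWhile_ne _ tl) 0, ← hihr]
          cases hB : countB (tl.dropWhile (fun s => s == "O"))
          simp
          congr 1
          ring
        · rw [countA_run_D _ r hx ho _ 0 0, ← hihr]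
          cases hB : countB (tl.dropWhile (fun s => s == r))
          simp [hx, ho]
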